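-- pv_equiv track=rewrite | github.com/astranero/tira | bothsame.py | count
-- ===== SOURCE A (Python) =====
-- def count(s):
--     # TODO
--     merkkijono = ""
--     osajonojen_lukumaara = 0
--
--     lukumaara_kirjasto = {}
--     for merkki in s:
--         if merkki in merkkijono:
--             maara = lukumaara_kirjasto[merkki]
--             osajonojen_lukumaara += (maara + 1)
--             lukumaara_kirjasto[merkki] += 1
--
--         if merkki not in merkkijono:
--             lukumaara_kirjasto[merkki] = 1
--             osajonojen_lukumaara +=1
--         merkkijono += merkki
--
--     return osajonojen_lukumaara
-- ===== SOURCE B (Python) =====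
-- def count(s):
--     freq = {}
--     for merkki in s:
--         freq[merkki] = freq.get(merkki, 0) + 1
--     total = 0
--     for k in freq.values():
--         total += k * (k + 1) // 2
--     return total
-- ===== Notes on version B (the rewrite author's own statement) =====
-- stated objective: faster
-- what changed: A accumulates one increment per character occurrence while also growing a string used for O(n) membership tests; B builds a frequency table in one pass and sums the closed form k*(k+1)//2 per distinct character.
import Mathlib
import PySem

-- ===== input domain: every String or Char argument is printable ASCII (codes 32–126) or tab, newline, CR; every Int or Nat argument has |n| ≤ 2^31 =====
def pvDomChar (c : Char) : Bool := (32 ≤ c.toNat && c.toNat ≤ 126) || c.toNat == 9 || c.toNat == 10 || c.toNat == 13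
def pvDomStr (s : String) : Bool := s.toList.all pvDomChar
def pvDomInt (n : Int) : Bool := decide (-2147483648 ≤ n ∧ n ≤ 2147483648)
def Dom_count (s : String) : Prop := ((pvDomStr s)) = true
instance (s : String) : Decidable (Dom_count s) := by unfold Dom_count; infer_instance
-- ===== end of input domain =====

-- B replaces A's per-occurrence accumulation (with an O(n) substring membership test per char)
-- by one frequency-counting pass plus the closed form k*(k+1)//2 per distinct character.

-- ===== PORT A =====
-- 'merkki in merkkijono' tests a single character against the accumulated string: exact as list
-- membership of the char; merkkijono is carried as its List Char. 'lukumaara_kirjasto[merkki]' is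
-- read only under the 'merkki in merkkijono' guard, where the key is always present, so the
-- getD default 0 is unreachable.
def countStep (st : List Char × Int × PySem.Dict Char Int) (merkki : Char) :
    List Char × Int × PySem.Dict Char Int :=
  let mj := st.1
  let tot := st.2.1
  let d := st.2.2
  let td :=
    if merkki ∈ mj then
      let maara := d.getD merkki 0
      (tot + (maara + 1), d.insert merkki (maara + 1))
    else (tot, d)
  let td :=
    if merkki ∉ mj then (td.1 + 1, td.2.insert merkki 1)
    else td
  (mj ++ [merkki], td)

def count (s : String) : Int :=
  (s.toList.foldl countStep (([] : List Char), (0 : Int), (PySem.Dict.empty : PySem.Dict Char Int))).2.1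

-- ===== PORT B =====
def count_alt (s : String) : Int :=
  let freq := s.toList.foldl (fun d c => d.insert c (d.getD c 0 + 1))
      (PySem.Dict.empty : PySem.Dict Char Int)
  freq.values.foldl (fun tot k => tot + PySem.Int.floordiv (k * (k + 1)) 2) 0

-- ===== PRECONDITION & SPEC =====
def Spec_count (s : String) (out : Int) : Prop := out = count_alt s
instance (s : String) (out : Int) : Decidable (Spec_count s out) := by unfold Spec_count; infer_instance

-- ===== CLAIM (what is proved, stated in full; the proofs are below) =====
def Claim_equal_count : Prop := ∀ (s : String), Dom_count s → Spec_count s (count s)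

-- ===== LEMMAS AND PROOFS =====

-- triangular number k*(k+1)//2, the per-character contribution
def tri (k : Int) : Int := PySem.Int.floordiv (k * (k + 1)) 2

-- the common value: sum of tri(count) over the distinct characters
def T (l : List Char) : Int :=
  ((PySem.Set.ofList l).map (fun k => tri ((l.count k : Int)))).sum

lemma tri_succ (m : Int) : tri (m + 1) = tri m + (m + 1) := by
  unfold tri
  obtain ⟨t, ht⟩ := Int.even_mul_succ_self m
  have h2 : (m + 1) * (m + 1 + 1) = m * (m + 1) + 2 * (m + 1) := by ring
  rw [PySem.Int.floordiv_eq_ediv_of_pos (by norm_num),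
      PySem.Int.floordiv_eq_ediv_of_pos (by norm_num), h2]
  omega

lemma sum_map_tri_bump (ks : List Char) (h : ks.Nodup) (c : Char) (hc : c ∈ ks)
    (f : Char → Int) :
    (ks.map (fun k => tri (if k = c then f k + 1 else f k))).sum
      = (ks.map (fun k => tri (f k))).sum + (f c + 1) := by
  induction ks with
  | nil => cases hc
  | cons k rest ih =>
    rcases List.mem_cons.mp hc with hkc | hrest
    · subst hkc
      obtain ⟨hck, hnd⟩ := List.nodup_cons.mp h
      simp only [List.map_cons, List.sum_cons, if_true]
      rw [List.map_congr_left (g := fun k' => tri (f k'))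
          (fun k' hk' => by rw [if_neg (fun he : k' = c => hck (he ▸ hk'))]),
          tri_succ]
      ring
    · have hk : k ≠ c := fun he => (List.nodup_cons.mp h).1 (he.symm ▸ hrest)
      simp only [List.map_cons, List.sum_cons, if_neg hk]
      rw [ih (List.nodup_cons.mp h).2 hrest]
      ring

lemma T_append (p : List Char) (c : Char) :
    T (p ++ [c]) = T p + ((p.count c : Int) + 1) := by
  unfold T
  have hset : PySem.Set.ofList (p ++ [c]) = PySem.Set.add (PySem.Set.ofList p) c := by
    rw [PySem.Set.ofList_eq_foldl, PySem.Set.ofList_eq_foldl, List.foldl_append]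
    rfl
  by_cases hc : c ∈ p
  · rw [hset, PySem.Set.add_of_mem ((PySem.Set.mem_ofList p c).mpr hc)]
    rw [List.map_congr_left (g := fun k => tri (if k = c then (p.count k : Int) + 1 else (p.count k : Int)))
        (fun k _ => by
          by_cases hkc : k = c
          · subst hkc
            simp only [List.count_append, List.count_singleton, beq_self_eq_true, if_true]
            push_cast
            ring_nf
          · simp [List.count_append, hkc, Ne.symm hkc])]
    rw [sum_map_tri_bump (PySem.Set.ofList p) (PySem.Set.nodup_ofList p) c
        ((PySem.Set.mem_ofList p c).mpr hc) (fun k => (p.count k : Int))]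
  · rw [hset, PySem.Set.add_of_not_mem (fun h => hc ((PySem.Set.mem_ofList p c).mp h))]
    rw [List.map_append, List.sum_append]
    have h1 : ((PySem.Set.ofList p).map (fun k => tri (((p ++ [c]).count k : Int)))).sum
        = ((PySem.Set.ofList p).map (fun k => tri ((p.count k : Int)))).sum := by
      apply congrArg
      apply List.map_congr_left
      intro k hk
      have hkc : k ≠ c := fun he => hc (he ▸ (PySem.Set.mem_ofList p k).mp hk)
      simp [List.count_append, Ne.symm hkc]
    have hcc : p.count c = 0 := List.count_eq_zero.mpr hc
    have htri1 : tri 1 = 1 := by decide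
    simp only [List.map_cons, List.map_nil, List.sum_cons, List.sum_nil, h1]
    simp [List.count_append, hcc, htri1]

lemma counter_step (p : List Char) (c : Char) :
    PySem.Dict.counter (p ++ [c])
      = (PySem.Dict.counter p).insert c ((PySem.Dict.counter p).getD c 0 + 1) := by
  rw [← PySem.Dict.foldl_insert_getD_add_one_eq_counter,
      ← PySem.Dict.foldl_insert_getD_add_one_eq_counter, List.foldl_append]
  rfl

lemma A_inv (l : List Char) : ∀ p : List Char,
    l.foldl countStep (p, T p, PySem.Dict.counter p)
      = (p ++ l, T (p ++ l), PySem.Dict.counter (p ++ l)) := by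
  induction l with
  | nil => intro p; simp
  | cons c l ih =>
    intro p
    have hstep : countStep (p, T p, PySem.Dict.counter p) c
        = (p ++ [c], T (p ++ [c]), PySem.Dict.counter (p ++ [c])) := by
      by_cases hc : c ∈ p
      · simp only [countStep, if_pos hc, if_neg (not_not_intro hc)]
        rw [PySem.Dict.getD_counter, T_append, counter_step, PySem.Dict.getD_counter]
      · simp only [countStep, if_neg hc, if_pos hc]
        rw [T_append, counter_step, PySem.Dict.getD_counter,
            List.count_eq_zero.mpr hc]
        norm_num
    rw [List.foldl_cons, hstep, ih]
    simp [List.append_assoc]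

-- ===== VERDICT (by name: the statement is the Claim_ definition above) =====
theorem count_spec : Claim_equal_count := by
  intro s _
  unfold Spec_count count count_alt
  have hA := A_inv s.toList []
  rw [List.nil_append] at hA
  rw [show (([] : List Char), (0 : Int), (PySem.Dict.empty : PySem.Dict Char Int))
        = (([] : List Char), T [], PySem.Dict.counter []) from rfl, hA]
  rw [PySem.Dict.foldl_insert_getD_add_one_eq_counter,
      PySem.List.foldl_add (g := fun k => PySem.Int.floordiv (k * (k + 1)) 2)]
  simp only [PySem.Dict.values, PySem.Dict.items_counter, List.map_map, zero_add]
  unfold T tri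
  apply congrArg
  apply List.map_congr_left
  intro k _
  rfl
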